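-- pv_equiv track=rewrite | github.com/Gui-DiGiorgi/Pygame-Games-and-Ideas | Random Slot Machine.py | full_matches
-- ===== SOURCE A (Python) =====
-- def full_matches(result):
--
--     match_type = []
--
--     for rolls, line in zip(result,range(len(result))):
--
--         matching = 1
--
--         active = False
--
--         for r in range(len(rolls)-1):
--
--             symbol = rolls[r]
--
--             if symbol == rolls[r+1]:
--
--                 active = True
--                 matching += 1
--
--             else:
--
--                 if active:
--                     active = False
--                     match_type.append([rolls[r-1], matching])
--                     matching = 1
--
--         if active:
--             match_type.append([rolls[r], matching])
--
--     return match_type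
-- ===== SOURCE B (Python) =====
-- def full_matches(result):
--     def runs(row):
--         # recursive run-length scan: peel the leading run, keep it if length >= 2
--         if not row:
--             return []
--         sym = row[0]
--         k = 1
--         while k < len(row) and row[k] == sym:
--             k += 1
--         rest = runs(row[k:])
--         return ([[sym, k]] + rest) if k >= 2 else rest
--     out = []
--     for row in result:
--         out += runs(row)
--     return out
-- ===== Notes on version B (the rewrite author's own statement) =====
-- stated objective: simpler
-- what changed: Replaces A's matching/active state machine over adjacent index pairs (with its rolls[r-1] lookup and trailing-run flush) by a direct run-length decomposition: recursively peel the leading run of each row and keep [symbol, length] when length >= 2.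
import Mathlib
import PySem

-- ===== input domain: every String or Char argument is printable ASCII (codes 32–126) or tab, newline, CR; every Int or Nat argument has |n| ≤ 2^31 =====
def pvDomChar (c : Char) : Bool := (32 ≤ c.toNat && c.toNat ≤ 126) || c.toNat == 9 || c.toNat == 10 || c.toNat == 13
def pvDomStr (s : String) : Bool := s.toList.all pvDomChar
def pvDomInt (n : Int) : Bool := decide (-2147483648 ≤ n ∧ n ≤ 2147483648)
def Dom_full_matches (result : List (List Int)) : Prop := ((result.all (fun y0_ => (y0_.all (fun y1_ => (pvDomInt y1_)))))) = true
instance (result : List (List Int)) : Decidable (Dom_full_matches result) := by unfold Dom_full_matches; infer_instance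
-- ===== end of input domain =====

-- B replaces A's matching/active state machine over adjacent index pairs by a recursive
-- run-length decomposition of each row (peel the leading run, keep [symbol, length] when length ≥ 2).


-- ===== PORT A =====
-- body of A's inner loop over r; the default 0 of pyGetD is never used (indices in range)
def pvBodyA (rolls : List Int) (s : Int × Bool × List (List Int)) (r : Int) :
    Int × Bool × List (List Int) :=
  let symbol := PySem.List.pyGetD rolls r 0
  if symbol == PySem.List.pyGetD rolls (r + 1) 0 then
    (s.1 + 1, true, s.2.2)
  else if s.2.1 then
    (1, false, s.2.2 ++ [[PySem.List.pyGetD rolls (r - 1) 0, s.1]])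
  else s

def full_matches (result : List (List Int)) : List (List Int) :=
  (result.zip (PySem.List.pyRange 0 (result.length : Int) 1)).foldl
    (fun match_type rl =>
      let rolls := rl.1
      let n : Int := (rolls.length : Int)
      let st := (PySem.List.pyRange 0 (n - 1) 1).foldl (pvBodyA rolls) (1, false, match_type)
      -- after the inner loop Python's r equals n - 2 whenever `active` is true (the loop ran)
      if st.2.1 then st.2.2 ++ [[PySem.List.pyGetD rolls (n - 2) 0, st.1]] else st.2.2)
    []

-- ===== PORT B =====
-- Source B's `runs`: the while loop counts the leading run (takeWhile); row[k:] is the dropWhile suffix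
def pvRuns : List Int → List (List Int)
  | [] => []
  | sym :: rest =>
    let k : Nat := 1 + (rest.takeWhile (fun x => x == sym)).length
    let tail := pvRuns (rest.dropWhile (fun x => x == sym))
    if 2 ≤ k then [sym, (k : Int)] :: tail else tail
termination_by row => row.length
decreasing_by
  simp only [List.length_cons]
  exact Nat.lt_succ_of_le (List.length_dropWhile_le _ _)

def full_matches_alt (result : List (List Int)) : List (List Int) :=
  result.foldl (fun out row => out ++ pvRuns row) []

-- ===== PRECONDITION & SPEC =====
def Spec_full_matches (result : List (List Int)) (out : List (List Int)) : Prop := out = full_matches_alt result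
instance (result : List (List Int)) (out : List (List Int)) : Decidable (Spec_full_matches result out) := by unfold Spec_full_matches; infer_instance

-- ===== CLAIM (what is proved, stated in full; the proofs are below) =====
def Claim_equal_full_matches : Prop := ∀ (result : List (List Int)), Dom_full_matches result → Spec_full_matches result (full_matches result)

-- ===== LEMMAS AND PROOFS =====

-- structural restatement of A's inner loop: `prev` carries rolls[r-1], the list argument is the
-- suffix of the row from index r on; the loop steps on adjacent pairs (cur, next)
def pvLoop : (Int × Bool × List (List Int)) → Int → List Int → Int × Bool × List (List Int)
  | s, _, [] => s
  | s, _, [_] => s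
  | s, prev, cur :: next :: rest =>
    if cur == next then pvLoop (s.1 + 1, true, s.2.2) cur (next :: rest)
    else if s.2.1 then pvLoop (1, false, s.2.2 ++ [[prev, s.1]]) cur (next :: rest)
    else pvLoop s cur (next :: rest)

-- final state of A's inner loop expressed run by run: (matching, active, acc so far)
def pvFin (acc : List (List Int)) : List Int → Int × Bool × List (List Int)
  | [] => (1, false, acc)
  | sym :: rest =>
    let j : Nat := (rest.takeWhile (fun x => x == sym)).length
    let rest' := rest.dropWhile (fun x => x == sym)
    if rest'.isEmpty then ((j : Int) + 1, decide (1 ≤ j), acc)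
    else pvFin (acc ++ if 1 ≤ j then [[sym, (j : Int) + 1]] else []) rest'
termination_by ys => ys.length
decreasing_by
  simp only [List.length_cons]
  exact Nat.lt_succ_of_le (List.length_dropWhile_le _ _)

theorem pvGetN (xs : List Int) (k : Nat) (hk : k < xs.length) :
    PySem.List.pyGetD xs (k : Int) 0 = xs[k] := by
  rw [PySem.List.pyGetD_natCast]
  exact List.getD_eq_getElem xs 0 hk

theorem pvLoop_idx (xs : List Int) :
    ∀ (d j : Nat) (s : Int × Bool × List (List Int)), xs.length - j = d →
      (PySem.List.pyRange (j : Int) ((xs.length : Int) - 1) 1).foldl (pvBodyA xs) s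
        = pvLoop s (PySem.List.pyGetD xs ((j : Int) - 1) 0) (xs.drop j) := by
  intro d
  induction d with
  | zero =>
    intro j s hd
    have hj : xs.length ≤ j := by omega
    rw [PySem.List.pyRange_one_eq_nil (by omega)]
    rw [List.drop_eq_nil_of_le hj]
    rfl
  | succ d ih =>
    intro j s hd
    by_cases hlt : j + 1 < xs.length
    · have hcons : PySem.List.pyRange (j : Int) ((xs.length : Int) - 1) 1
          = (j : Int) :: PySem.List.pyRange ((j : Int) + 1) ((xs.length : Int) - 1) 1 :=
        PySem.List.pyRange_one_cons (by omega)
      have hjlen : j < xs.length := by omega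
      have hdrop : xs.drop j = xs[j] :: xs.drop (j + 1) := List.drop_eq_getElem_cons hjlen
      have hdrop2 : xs.drop (j + 1) = xs[j + 1] :: xs.drop (j + 2) := List.drop_eq_getElem_cons hlt
      have hg1 : PySem.List.pyGetD xs ((j : Int)) 0 = xs[j] := pvGetN xs j hjlen
      have hg2 : PySem.List.pyGetD xs ((j : Int) + 1) 0 = xs[j + 1] := by
        rw [show ((j : Int) + 1) = (((j + 1 : Nat)) : Int) by push_cast; ring]
        exact pvGetN xs (j + 1) hlt
      have hstep : ∀ t, (PySem.List.pyRange ((j : Int) + 1) ((xs.length : Int) - 1) 1).foldl (pvBodyA xs) t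
          = pvLoop t xs[j] (xs[j + 1] :: xs.drop (j + 2)) := by
        intro t
        have h := ih (j + 1) t (by omega)
        rw [show (((j + 1 : Nat)) : Int) = (j : Int) + 1 by push_cast; ring] at h
        rw [h, add_sub_cancel_right, hg1, hdrop2]
      rw [hcons, List.foldl_cons, hdrop, hdrop2, pvLoop]
      simp only [pvBodyA, hg1, hg2]
      by_cases he : xs[j] = xs[j + 1]
      · have hb : (xs[j] == xs[j + 1]) = true := by simp [he]
        simp only [hb, reduceIte]
        rw [hstep]
      · have hb : (xs[j] == xs[j + 1]) = false := by simp [he]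
        by_cases ha : s.2.1 = true
        · simp only [hb, ha, Bool.false_eq_true, reduceIte]
          rw [hstep]
        · simp only [Bool.not_eq_true] at ha
          simp only [hb, ha, Bool.false_eq_true, reduceIte]
          rw [hstep]
    · -- range from j to length-1 is empty; the suffix has at most one element
      rw [PySem.List.pyRange_one_eq_nil (a := (j : Int)) (b := ((xs.length : Int) - 1)) (by omega)]
      rcases Nat.lt_or_ge j xs.length with hj | hj
      · have hnil : xs.drop (j + 1) = [] := List.drop_eq_nil_of_le (by omega)
        have hone : xs.drop j = [xs[j]] := by
          rw [List.drop_eq_getElem_cons hj, hnil]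
        rw [hone]; rfl
      · rw [List.drop_eq_nil_of_le hj]; rfl

-- consuming the interior of a run: j extra copies of sym after the head
theorem pvLoop_run (j : Nat) :
    ∀ (sym : Int) (rest : List Int) (s : Int × Bool × List (List Int)) (prev : Int), 1 ≤ j →
      pvLoop s prev (sym :: (List.replicate j sym ++ rest))
        = pvLoop (s.1 + (j : Int), true, s.2.2) sym (sym :: rest) := by
  induction j with
  | zero => intro _ _ _ _ h; omega
  | succ j ih =>
    intro sym rest s prev _
    rcases Nat.eq_zero_or_pos j with hj | hj
    · subst hj; simp [pvLoop]
    · have hrep : List.replicate (j + 1) sym ++ rest = sym :: (List.replicate j sym ++ rest) := by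
        simp [List.replicate_succ]
      rw [hrep, pvLoop]
      simp only [BEq.rfl, if_true]
      rw [ih sym rest (s.1 + 1, true, s.2.2) sym hj]
      have : s.1 + 1 + (j : Int) = s.1 + ((j : Nat) + 1 : Nat) := by push_cast; ring
      rw [this]

theorem takeWhile_eq_replicate (sym : Int) (rest : List Int) :
    rest.takeWhile (fun x => x == sym)
      = List.replicate (rest.takeWhile (fun x => x == sym)).length sym := by
  apply List.eq_replicate_of_mem
  intro b hb
  have := List.mem_takeWhile_imp hb
  simpa using this

theorem dropWhile_head_ne (sym : Int) (rest : List Int) {nxt : Int} {r' : List Int}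
    (h : rest.dropWhile (fun x => x == sym) = nxt :: r') : ¬ nxt = sym := by
  have := List.head_dropWhile_not (fun x => x == sym) (l := rest) (w := by rw [h]; simp)
  simp only [h, List.head_cons] at this
  simpa using this

-- A's inner loop, started fresh, reaches the run-by-run final state pvFin
theorem pvLoop_eq_pvFin (n : Nat) :
    ∀ (ys : List Int), ys.length ≤ n → ∀ (acc : List (List Int)) (prev : Int),
      pvLoop (1, false, acc) prev ys = pvFin acc ys := by
  induction n with
  | zero =>
    intro ys h acc prev
    have h0 : ys = [] := List.eq_nil_of_length_eq_zero (by omega)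
    subst h0
    simp [pvLoop, pvFin]
  | succ n ih =>
    intro ys hlen acc prev
    match ys with
    | [] => simp [pvLoop, pvFin]
    | sym :: rest =>
      rw [pvFin]
      set j := (rest.takeWhile (fun x => x == sym)).length with hj
      have hrep := takeWhile_eq_replicate sym rest
      have hrest : rest = List.replicate j sym ++ rest.dropWhile (fun x => x == sym) := by
        conv_lhs => rw [← List.takeWhile_append_dropWhile (p := fun x => x == sym) (l := rest)]
        rw [hrep]
      cases hdw : rest.dropWhile (fun x => x == sym) with
      | nil =>
        rw [hdw] at hrest
        simp only [List.append_nil] at hrest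
        simp only [List.isEmpty_nil, reduceIte]
        rcases Nat.eq_zero_or_pos j with h0 | h1
        · rw [hrest, h0]
          simp [pvLoop]
        · rw [hrest, ← List.append_nil (List.replicate j sym)]
          rw [pvLoop_run j sym [] (1, false, acc) prev h1]
          have h1' : 1 ≤ j := h1
          simp only [pvLoop]
          simp [h1', add_comm]
      | cons nxt r' =>
        have hne : ¬ nxt = sym := dropWhile_head_ne sym rest hdw
        have hneb : (sym == nxt) = false := by
          rw [beq_eq_false_iff_ne]
          exact Ne.symm hne
        rw [hdw] at hrest
        have hlen' : (nxt :: r').length ≤ n := by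
          have h1 := List.IsPrefix.length_le (List.takeWhile_prefix (l := rest) (fun x => x == sym))
          have h2 : rest.length = j + (nxt :: r').length := by
            conv_lhs => rw [hrest]
            simp
          simp only [List.length_cons] at hlen h2 ⊢
          omega
        simp only [List.isEmpty_cons, Bool.false_eq_true, reduceIte]
        rcases Nat.eq_zero_or_pos j with h0 | h1
        · rw [hrest, h0]
          simp only [List.replicate_zero, List.nil_append, pvLoop, hneb, Bool.false_eq_true,
            reduceIte]
          rw [ih (nxt :: r') hlen' acc sym]
          norm_num
        · conv_lhs => rw [hrest]
          rw [pvLoop_run j sym (nxt :: r') (1, false, acc) prev h1]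
          rw [pvLoop]
          simp only [hneb, Bool.false_eq_true, reduceIte]
          rw [ih (nxt :: r') hlen' _ sym]
          have h1' : 1 ≤ j := h1
          simp only [h1', reduceIte]
          have : (1 : Int) + (j : Int) = (j : Int) + 1 := by ring
          rw [this]

-- the final state's `active` flag forces at least two elements
theorem pvFin_active_len (n : Nat) :
    ∀ (ys : List Int), ys.length ≤ n → ∀ acc, (pvFin acc ys).2.1 = true → 2 ≤ ys.length := by
  induction n with
  | zero =>
    intro ys h acc hact
    have h0 : ys = [] := List.eq_nil_of_length_eq_zero (by omega)
    subst h0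
    simp [pvFin] at hact
  | succ n ih =>
    intro ys hlen acc hact
    match ys with
    | [] => simp [pvFin] at hact
    | sym :: rest =>
      rw [pvFin] at hact
      cases hdw : rest.dropWhile (fun x => x == sym) with
      | nil =>
        rw [hdw] at hact
        simp only [List.isEmpty_nil, reduceIte] at hact
        have h1 : 1 ≤ (rest.takeWhile (fun x => x == sym)).length := by
          by_contra hc
          simp only [not_le, Nat.lt_one_iff] at hc
          simp [hc] at hact
        have := List.IsPrefix.length_le (List.takeWhile_prefix (l := rest) (fun x => x == sym))
        simp only [List.length_cons]
        omega
      | cons nxt r' =>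
        rw [hdw] at hact
        simp only [List.isEmpty_cons, Bool.false_eq_true, reduceIte] at hact
        have hd := List.length_dropWhile_le (p := fun x => x == sym) (l := rest)
        rw [hdw] at hd
        have h2 := ih (nxt :: r') (by simp only [List.length_cons] at hlen hd ⊢; omega) _ hact
        simp only [List.length_cons] at h2 hd ⊢
        omega

-- the second-to-last element is unchanged by dropping a prefix, as long as two elements remain
theorem pvSecondLast_suffix (pre suf : List Int) (h2 : 2 ≤ suf.length) :
    PySem.List.pyGetD (pre ++ suf) (((pre ++ suf).length : Int) - 2) 0
      = PySem.List.pyGetD suf ((suf.length : Int) - 2) 0 := by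
  have hL : (pre ++ suf).length = pre.length + suf.length := by simp
  have hc1 : (((pre ++ suf).length : Int) - 2) = ((pre.length + (suf.length - 2) : Nat) : Int) := by
    rw [hL]; push_cast; omega
  have hc2 : ((suf.length : Int) - 2) = (((suf.length - 2 : Nat)) : Int) := by omega
  rw [hc1, hc2, pvGetN _ _ (by rw [hL]; omega), pvGetN _ _ (by omega)]
  rw [List.getElem_append_right (by omega)]
  congr 1
  omega

-- flushing the trailing run after pvFin yields exactly acc ++ pvRuns
theorem pvFin_flush (n : Nat) :
    ∀ (ys : List Int), ys.length ≤ n → ∀ (acc : List (List Int)),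
      (if (pvFin acc ys).2.1 then
        (pvFin acc ys).2.2 ++ [[PySem.List.pyGetD ys ((ys.length : Int) - 2) 0, (pvFin acc ys).1]]
       else (pvFin acc ys).2.2) = acc ++ pvRuns ys := by
  induction n with
  | zero =>
    intro ys h acc
    have h0 : ys = [] := List.eq_nil_of_length_eq_zero (by omega)
    subst h0
    simp [pvFin, pvRuns]
  | succ n ih =>
    intro ys hlen acc
    match ys with
    | [] => simp [pvFin, pvRuns]
    | sym :: rest =>
      rw [pvFin, pvRuns]
      set j := (rest.takeWhile (fun x => x == sym)).length with hj
      have hrep := takeWhile_eq_replicate sym rest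
      have hrest : rest = List.replicate j sym ++ rest.dropWhile (fun x => x == sym) := by
        conv_lhs => rw [← List.takeWhile_append_dropWhile (p := fun x => x == sym) (l := rest)]
        rw [hrep]
      cases hdw : rest.dropWhile (fun x => x == sym) with
      | nil =>
        rw [hdw] at hrest
        simp only [List.append_nil] at hrest
        simp only [List.isEmpty_nil, reduceIte]
        rcases Nat.eq_zero_or_pos j with h0 | h1
        · rw [hrest, h0]
          simp [pvRuns]
        · have hlen2 : (sym :: rest).length = j + 1 := by
            simp only [List.length_cons]
            conv_lhs => rw [hrest]
            simp
          have hget : PySem.List.pyGetD (sym :: rest) (((sym :: rest).length : Int) - 2) 0 = sym := by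
            have hcast : (((sym :: rest).length : Int) - 2) = ((j - 1 : Nat) : Int) := by
              rw [hlen2]; push_cast; omega
            rw [hcast, pvGetN _ _ (by rw [hlen2]; omega)]
            rcases Nat.eq_zero_or_pos (j - 1) with hz | hp
            · simp [hz]
            · have hne0 : j - 1 ≠ 0 := Nat.pos_iff_ne_zero.mp hp
              have hstep : (sym :: rest)[j - 1] = rest[j - 2]'(by rw [hrest]; simp only [List.length_replicate]; omega) := by
                simp [List.getElem_cons, hne0, Nat.sub_sub]
              rw [hstep]
              have : rest[j - 2]'(by rw [hrest]; simp only [List.length_replicate]; omega)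
                  = (List.replicate j sym)[j - 2]'(by simp; omega) := by
                congr 1
              rw [this]
              simp
          simp only [hget]
          have h2 : 2 ≤ 1 + j := by omega
          simp only [h2, reduceIte]
          have h1' : decide (1 ≤ j) = true := decide_eq_true h1
          simp only [h1', reduceIte, pvRuns]
          have hc : ((1 + j : Nat) : Int) = (j : Int) + 1 := by push_cast; ring
          rw [hc]
      | cons nxt r' =>
        have hne : ¬ nxt = sym := dropWhile_head_ne sym rest hdw
        rw [hdw] at hrest
        have hlen' : (nxt :: r').length ≤ n := by
          have hpre := List.IsPrefix.length_le (List.takeWhile_prefix (l := rest) (fun x => x == sym))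
          have hsum : rest.length = j + (nxt :: r').length := by
            conv_lhs => rw [hrest]
            simp
          simp only [List.length_cons] at hlen hsum ⊢
          omega
        simp only [List.isEmpty_cons, Bool.false_eq_true, reduceIte]
        have hIH := ih (nxt :: r') hlen' (acc ++ if 1 ≤ j then [[sym, (j : Int) + 1]] else [])
        have hpref : sym :: rest = (sym :: List.replicate j sym) ++ (nxt :: r') := by
          conv_lhs => rw [hrest]
          simp
        have hruns : (acc ++ if 2 ≤ 1 + j then [sym, ((1 + j : Nat) : Int)] :: pvRuns (nxt :: r') else pvRuns (nxt :: r'))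
            = (acc ++ if 1 ≤ j then [[sym, (j : Int) + 1]] else []) ++ pvRuns (nxt :: r') := by
          by_cases h1 : 1 ≤ j
          · have h2 : 2 ≤ 1 + j := by omega
            simp only [h1, h2, reduceIte]
            have hc : ((1 + j : Nat) : Int) = (j : Int) + 1 := by push_cast; ring
            rw [hc]
            simp
          · have h2 : ¬ 2 ≤ 1 + j := by omega
            simp only [h1, h2, reduceIte]
            simp
        rw [hruns, ← hIH]
        by_cases hact : (pvFin (acc ++ if 1 ≤ j then [[sym, (j : Int) + 1]] else []) (nxt :: r')).2.1 = true
        · have hlen2 : 2 ≤ (nxt :: r').length :=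
            pvFin_active_len (nxt :: r').length (nxt :: r') le_rfl _ hact
          simp only [hact, reduceIte]
          rw [hpref, pvSecondLast_suffix _ _ hlen2]
        · simp only [Bool.not_eq_true] at hact
          simp only [hact, Bool.false_eq_true, reduceIte]
-- one row of A equals acc ++ pvRuns row
theorem pvRow_eq (rolls : List Int) (acc : List (List Int)) :
    (let n : Int := (rolls.length : Int)
     let st := (PySem.List.pyRange 0 (n - 1) 1).foldl (pvBodyA rolls) (1, false, acc)
     if st.2.1 then st.2.2 ++ [[PySem.List.pyGetD rolls (n - 2) 0, st.1]] else st.2.2)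
    = acc ++ pvRuns rolls := by
  have h0 := pvLoop_idx rolls rolls.length 0 (1, false, acc) (by omega)
  simp only [Nat.cast_zero, List.drop_zero] at h0
  simp only [h0]
  rw [pvLoop_eq_pvFin rolls.length rolls le_rfl acc (PySem.List.pyGetD rolls (0 - 1) 0)]
  exact pvFin_flush rolls.length rolls le_rfl acc

-- ===== VERDICT (by name: the statement is the Claim_ definition above) =====
theorem full_matches_spec : Claim_equal_full_matches := by
  intro result _
  unfold Spec_full_matches full_matches full_matches_alt
  have hzip : (result.zip (PySem.List.pyRange 0 (result.length : Int) 1)).map Prod.fst = result := by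
    apply List.map_fst_zip
    rw [PySem.List.length_pyRange_one]
    simp
  conv_lhs => rw [← List.foldl_map (f := Prod.fst)
    (g := fun match_type rolls =>
      let n : Int := (rolls.length : Int)
      let st := (PySem.List.pyRange 0 (n - 1) 1).foldl (pvBodyA rolls) (1, false, match_type)
      if st.2.1 then st.2.2 ++ [[PySem.List.pyGetD rolls (n - 2) 0, st.1]] else st.2.2), hzip]
  have hfun : (fun (match_type : List (List Int)) (rolls : List Int) =>
      let n : Int := (rolls.length : Int)
      let st := (PySem.List.pyRange 0 (n - 1) 1).foldl (pvBodyA rolls) (1, false, match_type)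
      if st.2.1 then st.2.2 ++ [[PySem.List.pyGetD rolls (n - 2) 0, st.1]] else st.2.2)
      = (fun (out : List (List Int)) (row : List Int) => out ++ pvRuns row) := by
    funext acc rolls
    exact pvRow_eq rolls acc
  rw [hfun]
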